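-- pv_equiv track=rewrite | github.com/Alpam/projet_SD | bloc_node/b_pow.py | wrong_hash
-- ===== SOURCE A (Python) =====
-- def wrong_hash(string,required):
--     nb_zero = 0
--     for c in string:
--         if c =='0':
--             nb_zero += 1
--             if nb_zero == required :
--                 return False
--         else :
--             nb_zero = 0
--     return True
-- ===== SOURCE B (Python) =====
-- def wrong_hash(string, required):
--     if required <= 0 or required > len(string):
--         return True
--     return '0' * required not in string
-- ===== Notes on version B (the rewrite author's own statement) =====
-- stated objective: idiomatic
-- what changed: Replaces the manual run-length counting loop by building the pattern '0'*required once and using Python's built-in C substring search ('not in'), after directly guarding the cases required <= 0 and required > len(string) where no such run can be counted.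
import Mathlib
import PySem

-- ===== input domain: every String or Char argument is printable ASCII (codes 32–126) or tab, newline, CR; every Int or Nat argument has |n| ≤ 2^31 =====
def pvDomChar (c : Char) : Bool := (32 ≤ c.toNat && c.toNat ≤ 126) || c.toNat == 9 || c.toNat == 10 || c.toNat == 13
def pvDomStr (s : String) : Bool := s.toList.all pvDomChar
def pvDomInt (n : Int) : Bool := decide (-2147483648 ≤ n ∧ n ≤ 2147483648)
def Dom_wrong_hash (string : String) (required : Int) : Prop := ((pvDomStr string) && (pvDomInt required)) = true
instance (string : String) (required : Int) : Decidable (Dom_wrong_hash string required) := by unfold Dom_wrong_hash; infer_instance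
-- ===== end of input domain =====

-- B replaces A's manual run-length counting loop by a single substring test
-- ('0' * required not in string), guarding required ≤ 0 and required > len(string) directly (idiomatic; same cost).

-- ===== PORT A =====
-- the for-loop with counter nb_zero and early 'return False'
def wrongHashGo : List Char → Int → Int → Bool
  | [], _, _ => true
  | c :: rest, nb_zero, required =>
      if c = '0' then
        let nb_zero' := nb_zero + 1
        if nb_zero' = required then false
        else wrongHashGo rest nb_zero' required
      else wrongHashGo rest 0 required

def wrong_hash (string : String) (required : Int) : Bool :=
  wrongHashGo string.toList 0 required

-- ===== PORT B =====
-- '0' * required is List.replicate required.toNat '0' (required > 0 here);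
-- 'pat not in string' is !(PySem.Chars.isIn pat string.toList)
def wrong_hash_alt (string : String) (required : Int) : Bool :=
  if required ≤ 0 ∨ PySem.Str.len string < required then true
  else !(PySem.Chars.isIn (List.replicate required.toNat '0') string.toList)

-- ===== PRECONDITION & SPEC =====
def Spec_wrong_hash (string : String) (required : Int) (out : Bool) : Prop := out = wrong_hash_alt string required
instance (string : String) (required : Int) (out : Bool) : Decidable (Spec_wrong_hash string required out) := by unfold Spec_wrong_hash; infer_instance

-- ===== CLAIM (what is proved, stated in full; the proofs are below) =====
def Claim_equal_wrong_hash : Prop := ∀ (string : String) (required : Int), Dom_wrong_hash string required → Spec_wrong_hash string required (wrong_hash string required)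

-- ===== LEMMAS AND PROOFS =====

theorem go_cons_zero (rest : List Char) (nb req : Int) :
    wrongHashGo ('0' :: rest) nb req =
      if nb + 1 = req then false else wrongHashGo rest (nb + 1) req := by
  simp [wrongHashGo]

theorem go_cons_ne (c : Char) (rest : List Char) (nb req : Int) (hc : c ≠ '0') :
    wrongHashGo (c :: rest) nb req = wrongHashGo rest 0 req := by
  simp [wrongHashGo, hc]

-- with required ≤ 0 the counter (always ≥ 1 after the increment) never equals required
theorem wrongHashGo_nonpos (l : List Char) (nb req : Int) (hnb : 0 ≤ nb) (hreq : req ≤ 0) :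
    wrongHashGo l nb req = true := by
  induction l generalizing nb with
  | nil => rfl
  | cons c rest ih =>
      by_cases hc : c = '0'
      · subst hc
        rw [go_cons_zero, if_neg (by omega)]
        exact ih (nb + 1) (by omega)
      · rw [go_cons_ne c rest nb req hc]
        exact ih 0 le_rfl

-- loop characterisation: with m zeros already counted, the loop returns false iff the
-- string starts by completing the current run, or contains a fresh full run of k zeros
theorem wrongHashGo_false_iff (l : List Char) (m k : Nat) (hm : m < k) :
    wrongHashGo l (m : Int) (k : Int) = false ↔
      (List.replicate (k - m) '0' <+: l ∨ List.replicate k '0' <:+: l) := by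
  induction l generalizing m with
  | nil =>
      constructor
      · intro h; cases h
      · rintro (h | h)
        · rw [List.prefix_nil] at h
          have : k - m = 0 := by simpa using congrArg List.length h
          omega
        · rw [List.infix_nil] at h
          have : k = 0 := by simpa using congrArg List.length h
          omega
  | cons c rest ih =>
      by_cases hc : c = '0'
      · subst hc
        rw [go_cons_zero]
        by_cases hend : m + 1 = k
        · have hcond : ((m : Int) + 1 = (k : Int)) := by exact_mod_cast hend
          rw [if_pos hcond]
          constructor
          · intro _
            left
            have h1 : k - m = 1 := by omega
            rw [h1]
            simp
          · intro _; rfl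
        · have hcond : ¬ ((m : Int) + 1 = (k : Int)) := by
            intro h; exact hend (by exact_mod_cast h)
          rw [if_neg hcond]
          have hcast : (m : Int) + 1 = ((m + 1 : Nat) : Int) := by push_cast; ring
          rw [hcast, ih (m + 1) (by omega)]
          have hpre : List.replicate (k - m) '0' <+: ('0' :: rest) ↔
              List.replicate (k - (m + 1)) '0' <+: rest := by
            rw [show k - m = (k - (m + 1)) + 1 by omega, List.replicate_succ]
            constructor
            · intro h
              exact ((List.cons_prefix_cons).1 h).2
            · intro h
              exact (List.cons_prefix_cons).2 ⟨rfl, h⟩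
          have hinf : List.replicate k '0' <:+: ('0' :: rest) ↔
              (List.replicate k '0' <+: ('0' :: rest) ∨ List.replicate k '0' <:+: rest) :=
            List.infix_cons_iff
          rw [hpre, hinf]
          constructor
          · rintro (h | h)
            · exact Or.inl h
            · exact Or.inr (Or.inr h)
          · rintro (h | h | h)
            · exact Or.inl h
            · -- a full run starting at the head also completes the current run
              left
              rw [show k = (k - 1) + 1 by omega, List.replicate_succ] at h
              have htail : List.replicate (k - 1) '0' <+: rest := ((List.cons_prefix_cons).1 h).2
              have hsub : List.replicate (k - (m + 1)) '0' <+: List.replicate (k - 1) '0' :=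
                ⟨List.replicate m '0', by rw [← List.replicate_add]; congr 1; omega⟩
              exact hsub.trans htail
            · exact Or.inr h
      · rw [go_cons_ne c rest _ _ hc]
        rw [show (0 : Int) = ((0 : Nat) : Int) from rfl, ih 0 (by omega)]
        have hhead : ∀ n, 0 < n → ¬ (List.replicate n '0' <+: (c :: rest)) := by
          intro n hn h
          rw [show n = (n - 1) + 1 by omega, List.replicate_succ] at h
          exact hc ((List.cons_prefix_cons).1 h).1.symm
        constructor
        · rintro (h | h)
          · exact Or.inr ((List.infix_cons_iff).2 (Or.inr (List.IsPrefix.isInfix h)))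
          · exact Or.inr ((List.infix_cons_iff).2 (Or.inr h))
        · rintro (h | h)
          · exact absurd h (hhead (k - m) (by omega))
          · rcases (List.infix_cons_iff).1 h with h | h
            · exact absurd h (hhead k (by omega))
            · exact Or.inr h

-- ===== VERDICT (by name: the statement is the Claim_ definition above) =====
theorem wrong_hash_spec : Claim_equal_wrong_hash := by
  intro s req _
  unfold Spec_wrong_hash wrong_hash wrong_hash_alt
  by_cases hreq : req ≤ 0
  · rw [if_pos (Or.inl hreq)]
    exact wrongHashGo_nonpos s.toList 0 req le_rfl hreq
  · obtain ⟨k, hk⟩ : ∃ k : Nat, req = (k : Int) := ⟨req.toNat, by omega⟩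
    subst hk
    have hpos : 0 < k := by omega
    have hchar := wrongHashGo_false_iff s.toList 0 k hpos
    rw [Nat.sub_zero] at hchar
    by_cases hlen : PySem.Str.len s < (k : Int)
    · -- pattern longer than the string: no run of k zeros can occur, loop returns true
      rw [if_pos (Or.inr hlen)]
      have hlen' : s.toList.length < k := by
        have := PySem.Str.len_eq s
        omega
      cases hgo : wrongHashGo s.toList ((0 : Nat) : Int) (k : Int) with
      | false =>
          exfalso
          rcases hchar.1 hgo with h | h
          · have := h.length_le
            simp only [List.length_replicate] at this; omega
          · have := h.length_le
            simp only [List.length_replicate] at this; omega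
      | true => simp
    · rw [if_neg (by rintro (h | h) <;> omega)]
      rw [Int.toNat_natCast]
      rcases hIn : PySem.Chars.isIn (List.replicate k '0') s.toList with _ | _
      · -- isIn = false : no infix, loop returns true
        have hninf := (PySem.Chars.isIn_eq_false_iff _ _).1 hIn
        cases hgo : wrongHashGo s.toList ((0 : Nat) : Int) (k : Int) with
        | false =>
            exfalso
            rcases hchar.1 hgo with h | h
            · exact hninf (List.IsPrefix.isInfix h)
            · exact hninf h
        | true => simp
      · -- isIn = true : infix, loop returns false
        have hinf := (PySem.Chars.isIn_iff_infix _ _).1 hIn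
        have := hchar.2 (Or.inr hinf)
        simpa using this
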